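-- pv_equiv track=rewrite | github.com/clwoodmont/PythonII_Connect4Game | Connect4Game/YosefBirnbaumAI.py | is_line
-- ===== SOURCE A (Python) =====
-- def is_line(game_state, size, row, col, dr, dc, player_num):
--         """
--     This method recieves a Connect4Game class or a copy of it and determines weather there is a line of a certain size
--     in a specific direction for a given value.
--
--     Parameters
--     ----------
--     game_safety_copy (object):
--             An instance of the Connect4Game class.
--     size (int):
--             length of potential line
--     row (int):
--             row of current index
--     col (int)
--             of current index
--     dr  (int):
--             direction to move vertically
--     dc  (int):
--             direction to move in hoizontally
--     player_num (int):
--             value to find in a line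
--
--     Returns
--     -------
--     (bool): True if line is found and False if not
--         """
--     # initialize a counter to hold the amount of consecutive values and reassign the values to be offset from their original
--     # positions by one less than their size to be able to complete a line of the desired size. Offsetting enables the fuction
--     # to look in different directions for a line.
--         count = 0
--         row -= (dr * (size - 1))
--         col -= (dc * (size - 1))
--
--     # iterate through amount of spaces that can contain the line from the current index which is one less than double it's size.
--     # test if these spaces are on the board (since offseting especially from near the edges can be off the board) and if the desired
--     # value is found. For each consecutive value found add 1 to the count and if desired size is found return player value.
--         for _ in range((size * 2) - 1):
--             if 0 <= row < 6 and 0 <= col < 7 and game_state[row][col] == player_num: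
--                 count += 1
--                 if count == size:
--                     return True
--
--     # if any of the iterations yeild an index out of range or an opponents value, the count reverts back to zero
--             else:
--                 count = 0
--
--     # each iteration add one (or zero which does nothing) to the row/col index to explore the complete possible winning direction.
--     # if no line is found "None" will be returned
--             row += dr
--             col += dc
--
--     # if no line is found return False
--         return False
-- ===== SOURCE B (Python) =====
-- def is_line(game_state, size, row, col, dr, dc, player_num):
--     row -= dr * (size - 1)
--     col -= dc * (size - 1)
--     for j in range(size):
--         if all(
--             0 <= row + (j + k) * dr < 6
--             and 0 <= col + (j + k) * dc < 7
--             and game_state[row + (j + k) * dr][col + (j + k) * dc] == player_num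
--             for k in range(size)
--         ):
--             return True
--     return False
-- ===== Notes on version B (the rewrite author's own statement) =====
-- stated objective: alternative
-- what changed: Replaces the single-pass running-consecutive counter with an explicit nested scan that tests each of the size candidate length-size windows of the 2*size-1 span, returning True if any window is entirely on-board and equal to player_num.
-- outside the precondition, e.g. on is_line([[1, 1]], 2, 0, 1, 0, 1, 1): A returns True, B returns True
import Mathlib
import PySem

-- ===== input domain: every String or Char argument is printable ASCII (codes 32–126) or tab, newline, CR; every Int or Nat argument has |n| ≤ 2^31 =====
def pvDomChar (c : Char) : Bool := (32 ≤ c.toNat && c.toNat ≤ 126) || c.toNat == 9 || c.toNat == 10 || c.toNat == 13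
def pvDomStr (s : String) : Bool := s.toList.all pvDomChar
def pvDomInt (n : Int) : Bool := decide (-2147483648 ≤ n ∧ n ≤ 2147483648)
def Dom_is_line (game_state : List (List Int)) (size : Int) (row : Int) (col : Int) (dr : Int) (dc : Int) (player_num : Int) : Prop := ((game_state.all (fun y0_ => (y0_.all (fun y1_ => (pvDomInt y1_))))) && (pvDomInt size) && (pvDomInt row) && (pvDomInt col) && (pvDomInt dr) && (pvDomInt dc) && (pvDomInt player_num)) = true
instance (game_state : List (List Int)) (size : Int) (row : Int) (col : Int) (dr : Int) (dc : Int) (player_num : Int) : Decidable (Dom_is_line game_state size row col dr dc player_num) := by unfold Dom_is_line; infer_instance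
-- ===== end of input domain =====

-- ===== PORT A =====
-- B re-implements A's counter scan as an explicit nested window scan (alternative decomposition, same cost class).
-- Shared cell test: on-board (0<=r<6, 0<=c<7) and game_state[r][c] == player_num (Python indexing via pyGet?).
def goodCell (game_state : List (List Int)) (player_num r c : Int) : Bool :=
  decide (0 ≤ r) && decide (r < 6) && decide (0 ≤ c) && decide (c < 7) &&
  (((PySem.List.pyGet? game_state r).bind fun rw => PySem.List.pyGet? rw c) == some player_num)

-- A's loop: fuel = remaining iterations, carrying (count, row, col); early return when count reaches size.
def isLineAux (game_state : List (List Int)) (size player_num dr dc : Int) :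
    Nat → Int → Int → Int → Bool
  | 0, _, _, _ => false
  | n+1, count, r, c =>
    if goodCell game_state player_num r c then
      (if count + 1 == size then true
       else isLineAux game_state size player_num dr dc n (count+1) (r+dr) (c+dc))
    else isLineAux game_state size player_num dr dc n 0 (r+dr) (c+dc)

def is_line (game_state : List (List Int)) (size : Int) (row : Int) (col : Int) (dr : Int) (dc : Int) (player_num : Int) : Bool :=
  isLineAux game_state size player_num dr dc ((size * 2 - 1).toNat) 0
    (row - dr * (size - 1)) (col - dc * (size - 1))

-- ===== PORT B =====
def is_line_alt (game_state : List (List Int)) (size : Int) (row : Int) (col : Int) (dr : Int) (dc : Int) (player_num : Int) : Bool :=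
  let r0 := row - dr * (size - 1)
  let c0 := col - dc * (size - 1)
  (List.range size.toNat).any fun j =>
    (List.range size.toNat).all fun k =>
      goodCell game_state player_num (r0 + ((j : Int) + (k : Int)) * dr) (c0 + ((j : Int) + (k : Int)) * dc)

-- ===== PRECONDITION & SPEC =====
-- Whether the scan (positions (row0 + dr*i, col0 + dc*i) for 0 <= i < n) ever visits cell (r, c):
-- if a direction component is nonzero, the only candidate step index i is determined by exact division,
-- so this is checkable without iterating the (possibly huge) range.
def scanVisits (row0 col0 dr dc n r c : Int) : Bool :=
  if dr == 0 && dc == 0 then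
    decide (0 < n) && row0 == r && col0 == c
  else
    let i := if dr == 0 then (c - col0) / dc else (r - row0) / dr
    decide (0 ≤ i) && decide (i < n) && row0 + dr * i == r && col0 + dc * i == c

-- Pre_ excludes inputs where some on-board position (0<=r<6, 0<=c<7) scanned by A is missing from a
-- board smaller than 6x7, where A in general raises IndexError (though it can return True early before
-- reaching such a position: see the cited excluded example, on which A and B both return True).
def Pre_is_line (game_state : List (List Int)) (size : Int) (row : Int) (col : Int) (dr : Int) (dc : Int) (player_num : Int) : Prop :=
  ∀ r ∈ List.range 6, ∀ c ∈ List.range 7,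
    scanVisits (row - dr * (size - 1)) (col - dc * (size - 1)) dr dc (size * 2 - 1) (r : Int) (c : Int) = true →
    (((PySem.List.pyGet? game_state (r : Int)).bind
        fun rw => PySem.List.pyGet? rw (c : Int)).isSome = true)
instance (game_state : List (List Int)) (size : Int) (row : Int) (col : Int) (dr : Int) (dc : Int) (player_num : Int) : Decidable (Pre_is_line game_state size row col dr dc player_num) := by unfold Pre_is_line; infer_instance

def pvWitness_is_line : List (List Int) × Int × Int × Int × Int × Int × Int :=
  ([[0,0,0,0,0,0,0],[0,0,0,0,0,0,0],[0,0,0,0,0,0,0],[0,0,0,0,0,0,0],[0,0,0,0,0,0,0],[0,1,1,1,1,0,0]],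
   4, 5, 2, 0, 1, 1)

def Spec_is_line (game_state : List (List Int)) (size : Int) (row : Int) (col : Int) (dr : Int) (dc : Int) (player_num : Int) (out : Bool) : Prop := out = is_line_alt game_state size row col dr dc player_num
instance (game_state : List (List Int)) (size : Int) (row : Int) (col : Int) (dr : Int) (dc : Int) (player_num : Int) (out : Bool) : Decidable (Spec_is_line game_state size row col dr dc player_num out) := by unfold Spec_is_line; infer_instance

-- ===== CLAIM (what is proved, stated in full; the proofs are below) =====
def Claim_equal_is_line : Prop := ∀ (game_state : List (List Int)) (size : Int) (row : Int) (col : Int) (dr : Int) (dc : Int) (player_num : Int), Dom_is_line game_state size row col dr dc player_num → Pre_is_line game_state size row col dr dc player_num → Spec_is_line game_state size row col dr dc player_num (is_line game_state size row col dr dc player_num)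

-- ===== LEMMAS AND PROOFS =====

-- Characterisation of A's counting loop: it returns true iff some stretch [a,u] inside the remaining
-- fuel consists of good cells and is long enough (the incoming count credits a stretch starting at 0).
theorem isLineAux_iff (game_state : List (List Int)) (size player_num dr dc : Int) :
    ∀ (fuel : Nat) (count r c : Int), 0 ≤ count → count < size →
    (isLineAux game_state size player_num dr dc fuel count r c = true ↔
      ∃ a u : Nat, a ≤ u ∧ u < fuel ∧
        (if a = 0 then count else 0) + ((u : Int) + 1 - (a : Int)) ≥ size ∧
        ∀ k : Nat, a ≤ k → k ≤ u →
          goodCell game_state player_num (r + dr * (k : Int)) (c + dc * (k : Int)) = true) := by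
  intro fuel
  induction fuel with
  | zero =>
    intro count r c h0 hs
    simp [isLineAux]
  | succ f ih =>
    intro count r c h0 hs
    by_cases hg : goodCell game_state player_num r c = true
    · by_cases hcs : count + 1 = size
      · have hL : isLineAux game_state size player_num dr dc (f+1) count r c = true := by
          simp [isLineAux, hg, hcs]
        rw [hL]
        constructor
        · intro _
          refine ⟨0, 0, le_refl _, Nat.succ_pos _, by simp; omega, ?_⟩
          intro k hk1 hk2
          have hk0 : k = 0 := Nat.le_zero.mp hk2
          subst hk0
          simpa using hg
        · intro _; rfl
      · have hEq : isLineAux game_state size player_num dr dc (f+1) count r c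
            = isLineAux game_state size player_num dr dc f (count+1) (r+dr) (c+dc) := by
          simp [isLineAux, hg, hcs]
        rw [hEq, ih (count+1) (r+dr) (c+dc) (by omega) (by omega)]
        constructor
        · rintro ⟨a, u, hau, huf, hlen, hrun⟩
          rcases Nat.eq_zero_or_pos a with ha | ha
          · subst ha
            refine ⟨0, u+1, Nat.zero_le _, by omega, ?_, ?_⟩
            · simp only [reduceIte] at hlen ⊢; push_cast at hlen ⊢; omega
            · intro k hk1 hk2
              rcases Nat.eq_zero_or_pos k with hk0 | hk0
              · subst hk0; simpa using hg
              · obtain ⟨k', rfl⟩ : ∃ k', k = k' + 1 := ⟨k - 1, by omega⟩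
                have := hrun k' (Nat.zero_le _) (by omega)
                have e1 : r + dr * ((k' + 1 : Nat) : Int) = (r + dr) + dr * (k' : Int) := by
                  push_cast; ring
                have e2 : c + dc * ((k' + 1 : Nat) : Int) = (c + dc) + dc * (k' : Int) := by
                  push_cast; ring
                rw [e1, e2]; exact this
          · refine ⟨a+1, u+1, by omega, by omega, ?_, ?_⟩
            · rw [if_neg (by omega)]
              rw [if_neg (by omega)] at hlen
              push_cast at hlen ⊢; omega
            · intro k hk1 hk2
              obtain ⟨k', rfl⟩ : ∃ k', k = k' + 1 := ⟨k - 1, by omega⟩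
              have := hrun k' (by omega) (by omega)
              have e1 : r + dr * ((k' + 1 : Nat) : Int) = (r + dr) + dr * (k' : Int) := by
                push_cast; ring
              have e2 : c + dc * ((k' + 1 : Nat) : Int) = (c + dc) + dc * (k' : Int) := by
                push_cast; ring
              rw [e1, e2]; exact this
        · rintro ⟨a, u, hau, huf, hlen, hrun⟩
          have hu1 : 1 ≤ u := by
            rcases Nat.eq_zero_or_pos u with hu0 | hu0
            · subst hu0
              have ha0 : a = 0 := Nat.le_zero.mp hau
              subst ha0
              rw [if_pos rfl] at hlen; push_cast at hlen; omega
            · omega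
          rcases Nat.lt_or_ge a 2 with ha2 | ha2
          · -- a = 0 or a = 1 : use inner stretch starting at 0 with credit count+1
            refine ⟨0, u-1, Nat.zero_le _, by omega, ?_, ?_⟩
            · rw [if_pos rfl]
              have : (if a = 0 then count else 0) + ((u : Int) + 1 - (a : Int)) ≥ size := hlen
              rcases Nat.eq_zero_or_pos a with ha | ha
              · subst ha; rw [if_pos rfl] at this; push_cast at this ⊢; omega
              · have ha1 : a = 1 := by omega
                subst ha1; rw [if_neg (by omega)] at this; push_cast at this ⊢; omega
            · intro k hk1 hk2
              have := hrun (k+1) (by omega) (by omega)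
              have e1 : r + dr * ((k + 1 : Nat) : Int) = (r + dr) + dr * (k : Int) := by
                push_cast; ring
              have e2 : c + dc * ((k + 1 : Nat) : Int) = (c + dc) + dc * (k : Int) := by
                push_cast; ring
              rw [e1, e2] at this; exact this
          · refine ⟨a-1, u-1, by omega, by omega, ?_, ?_⟩
            · rw [if_neg (by omega)]
              rw [if_neg (by omega)] at hlen
              have e : ((u - 1 : Nat) : Int) + 1 - ((a - 1 : Nat) : Int) = (u : Int) + 1 - (a : Int) := by
                omega
              rw [e]; omega
            · intro k hk1 hk2
              have := hrun (k+1) (by omega) (by omega)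
              have e1 : r + dr * ((k + 1 : Nat) : Int) = (r + dr) + dr * (k : Int) := by
                push_cast; ring
              have e2 : c + dc * ((k + 1 : Nat) : Int) = (c + dc) + dc * (k : Int) := by
                push_cast; ring
              rw [e1, e2] at this; exact this
    · have hEq : isLineAux game_state size player_num dr dc (f+1) count r c
          = isLineAux game_state size player_num dr dc f 0 (r+dr) (c+dc) := by
        simp [isLineAux, hg]
      rw [hEq, ih 0 (r+dr) (c+dc) (le_refl 0) (by omega)]
      constructor
      · rintro ⟨a, u, hau, huf, hlen, hrun⟩
        refine ⟨a+1, u+1, by omega, by omega, ?_, ?_⟩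
        · rw [if_neg (by omega)]
          have : (if a = 0 then (0:Int) else 0) = 0 := by split <;> rfl
          rw [this] at hlen
          push_cast at hlen ⊢; omega
        · intro k hk1 hk2
          obtain ⟨k', rfl⟩ : ∃ k', k = k' + 1 := ⟨k - 1, by omega⟩
          have := hrun k' (by omega) (by omega)
          have e1 : r + dr * ((k' + 1 : Nat) : Int) = (r + dr) + dr * (k' : Int) := by
            push_cast; ring
          have e2 : c + dc * ((k' + 1 : Nat) : Int) = (c + dc) + dc * (k' : Int) := by
            push_cast; ring
          rw [e1, e2]; exact this
      · rintro ⟨a, u, hau, huf, hlen, hrun⟩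
        have ha1 : 1 ≤ a := by
          by_contra hcon
          have ha0 : a = 0 := by omega
          subst ha0
          have := hrun 0 (le_refl _) (Nat.zero_le _)
          simp at this
          exact hg this
        refine ⟨a-1, u-1, by omega, by omega, ?_, ?_⟩
        · have hz : (if a - 1 = 0 then (0:Int) else 0) = 0 := by split <;> rfl
          rw [hz]
          rw [if_neg (by omega)] at hlen
          have e : ((u - 1 : Nat) : Int) + 1 - ((a - 1 : Nat) : Int) = (u : Int) + 1 - (a : Int) := by
            omega
          rw [e]; omega
        · intro k hk1 hk2
          have := hrun (k+1) (by omega) (by omega)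
          have e1 : r + dr * ((k + 1 : Nat) : Int) = (r + dr) + dr * (k : Int) := by
            push_cast; ring
          have e2 : c + dc * ((k + 1 : Nat) : Int) = (c + dc) + dc * (k : Int) := by
            push_cast; ring
          rw [e1, e2] at this; exact this

-- ===== VERDICT (by name: the statement is the Claim_ definition above) =====
theorem is_line_spec : Claim_equal_is_line := by
  intro gs size row col dr dc p _ _
  unfold Spec_is_line is_line is_line_alt
  by_cases hsz : size ≤ 0
  · have h1 : (size * 2 - 1).toNat = 0 := by omega
    have h2 : size.toNat = 0 := by omega
    simp [h1, h2, isLineAux]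
  · have hs1 : 1 ≤ size := by omega
    set r0 := row - dr * (size - 1) with hr0
    set c0 := col - dc * (size - 1) with hc0
    set s : Nat := size.toNat with hsdef
    have hs : (s : Int) = size := Int.toNat_of_nonneg (by omega)
    have hN : (size * 2 - 1).toNat = 2 * s - 1 := by omega
    rw [Bool.eq_iff_iff, hN,
        isLineAux_iff gs size p dr dc (2 * s - 1) 0 r0 c0 (le_refl 0) (by omega)]
    simp only [List.any_eq_true, List.all_eq_true, List.mem_range]
    constructor
    · rintro ⟨a, u, hau, huf, hlen, hrun⟩
      rw [ite_self] at hlen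
      have hus : (u : Int) + 1 - (a : Int) ≥ (s : Int) := by rw [hs]; omega
      refine ⟨a, by omega, ?_⟩
      intro k hk
      have := hrun (a + k) (by omega) (by omega)
      have e1 : r0 + ((a : Int) + (k : Int)) * dr = r0 + dr * ((a + k : Nat) : Int) := by
        push_cast; ring
      have e2 : c0 + ((a : Int) + (k : Int)) * dc = c0 + dc * ((a + k : Nat) : Int) := by
        push_cast; ring
      rw [e1, e2]; exact this
    · rintro ⟨j, hj, hall⟩
      refine ⟨j, j + s - 1, by omega, by omega, ?_, ?_⟩
      · rw [ite_self]
        have e : ((j + s - 1 : Nat) : Int) + 1 - (j : Int) = (s : Int) := by omega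
        rw [e, hs]; omega
      · intro k hk1 hk2
        have := hall (k - j) (by omega)
        have e1 : r0 + ((j : Int) + ((k - j : Nat) : Int)) * dr = r0 + dr * (k : Int) := by
          have : ((k - j : Nat) : Int) = (k : Int) - (j : Int) := by omega
          rw [this]; ring
        have e2 : c0 + ((j : Int) + ((k - j : Nat) : Int)) * dc = c0 + dc * (k : Int) := by
          have : ((k - j : Nat) : Int) = (k : Int) - (j : Int) := by omega
          rw [this]; ring
        rw [e1, e2] at this; exact this
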